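-- pv_equiv track=rewrite | github.com/nqlong88/python_programming_v2 | GA_Practice/class6_pratice.py | count_palindrome
-- ===== SOURCE A (Python) =====
-- def count_palindrome(sample_list):
--     count = 0 #Made mistake and had count in the for loop: count needs to be started before the loop. Otherwise it will always be 0
--     for string in sample_list:
--         index = len(string)-1
--         new_string =''
--         # Had count = 0 here before: wrong -> this reset count to 0 everytime
--         while index >= 0:
--             new_string += string[index]
--             index -= 1
--         if new_string == string:
--             count += 1
--     return f' the count is {count}'
-- ===== SOURCE B (Python) =====
-- def count_palindrome(sample_list):
--     count = 0
--     for string in sample_list: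
--         i = 0
--         j = len(string) - 1
--         ok = True
--         while i < j:
--             if string[i] != string[j]:
--                 ok = False
--                 break
--             i += 1
--             j -= 1
--         if ok:
--             count += 1
--     return f' the count is {count}'
-- ===== Notes on version B (the rewrite author's own statement) =====
-- stated objective: faster
-- what changed: Replaces building a full reversed copy of each string (character-by-character concatenation) and comparing it whole with an in-place two-pointer scan from both ends that stops at the first mismatch, keeping only two indices and a flag.
import Mathlib
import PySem

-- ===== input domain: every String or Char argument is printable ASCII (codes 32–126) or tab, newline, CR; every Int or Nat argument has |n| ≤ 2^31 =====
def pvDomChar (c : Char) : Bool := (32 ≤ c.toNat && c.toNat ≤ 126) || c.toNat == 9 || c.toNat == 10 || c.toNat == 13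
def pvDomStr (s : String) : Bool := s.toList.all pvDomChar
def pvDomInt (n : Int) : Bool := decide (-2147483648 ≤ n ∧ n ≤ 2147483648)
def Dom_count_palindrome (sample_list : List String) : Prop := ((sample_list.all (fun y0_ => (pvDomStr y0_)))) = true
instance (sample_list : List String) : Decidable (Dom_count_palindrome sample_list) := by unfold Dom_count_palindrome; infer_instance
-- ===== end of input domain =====

-- B replaces A's build-reversed-copy-then-compare check by a converging two-pointer scan
-- that stops at the first mismatch (alternative decomposition; same asymptotic cost).


-- ===== PORT A =====
-- the 'while index >= 0: new_string += string[index]; index -= 1' loop, as countdown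
-- recursion on index+1 (index = n-1 at each call); string[index] is in range, so
-- pyGet? always returns 'some' here (the 'none' arm is unreachable).
def pvAWhile (cs : List Char) : Nat → List Char → List Char
  | 0, acc => acc
  | n + 1, acc =>
      match PySem.List.pyGet? cs (n : Int) with
      | some c => pvAWhile cs n (acc ++ [c])
      | none => acc

def count_palindrome (sample_list : List String) : String :=
  let count := sample_list.foldl
    (fun count string =>
      let new_string := pvAWhile string.toList string.toList.length []
      if new_string = string.toList then count + 1 else count) (0 : Int)
  " the count is " ++ PySem.Int.toStr count

-- ===== PORT B =====
-- the 'while i < j: compare string[i], string[j]; break on mismatch' loop of Source B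
def pvTwoPtr (cs : List Char) (i j : Int) : Bool :=
  if i < j then
    if PySem.List.pyGet? cs i = PySem.List.pyGet? cs j then pvTwoPtr cs (i + 1) (j - 1)
    else false
  else true
termination_by (j - i).toNat
decreasing_by omega

def count_palindrome_alt (sample_list : List String) : String :=
  let count := sample_list.foldl
    (fun count string =>
      if pvTwoPtr string.toList 0 ((string.toList.length : Int) - 1) then count + 1
      else count) (0 : Int)
  " the count is " ++ PySem.Int.toStr count

-- ===== PRECONDITION & SPEC =====
def Spec_count_palindrome (sample_list : List String) (out : String) : Prop := out = count_palindrome_alt sample_list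
instance (sample_list : List String) (out : String) : Decidable (Spec_count_palindrome sample_list out) := by unfold Spec_count_palindrome; infer_instance

-- ===== CLAIM (what is proved, stated in full; the proofs are below) =====
def Claim_equal_count_palindrome : Prop := ∀ (sample_list : List String), Dom_count_palindrome sample_list → Spec_count_palindrome sample_list (count_palindrome sample_list)

-- ===== LEMMAS AND PROOFS =====

-- A's while loop builds the reverse of the first n characters.
theorem pvAWhile_eq (cs : List Char) :
    ∀ (n : Nat), n ≤ cs.length → ∀ acc, pvAWhile cs n acc = acc ++ (cs.take n).reverse := by
  intro n
  induction n with
  | zero => intro _ acc; simp [pvAWhile]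
  | succ n ih =>
      intro hn acc
      have hlt : n < cs.length := by omega
      have hget : PySem.List.pyGet? cs (n : Int) = some cs[n] := by
        simp [PySem.List.pyGet?_natCast, List.getElem?_eq_getElem hlt]
      simp only [pvAWhile, hget]
      have ht : List.take (n+1) cs = List.take n cs ++ [cs[n]] := by
        rw [List.take_add_one, List.getElem?_eq_getElem hlt]; rfl
      rw [ih (by omega), ht, List.reverse_append]
      simp [List.append_assoc]

-- the two-pointer loop decides symmetric agreement of the scanned window
theorem pvTwoPtr_iff (cs : List Char) :
    ∀ (n : Nat) (i j : Int), (j - i).toNat = n →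
      (pvTwoPtr cs i j = true ↔
        ∀ k : Int, i ≤ k → k ≤ j → PySem.List.pyGet? cs k = PySem.List.pyGet? cs (i + j - k)) := by
  intro n
  induction n using Nat.strong_induction_on with
  | _ n ih =>
    intro i j hn
    by_cases hij : i < j
    · rw [pvTwoPtr, if_pos hij]
      by_cases heq : PySem.List.pyGet? cs i = PySem.List.pyGet? cs j
      · rw [if_pos heq]
        rw [ih ((j - 1) - (i + 1)).toNat (by omega) (i + 1) (j - 1) rfl]
        constructor
        · intro h k hik hkj
          by_cases hk1 : k = i
          · subst hk1; simpa using heq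
          · by_cases hk2 : k = j
            · subst hk2; simpa using heq.symm
            · have := h k (by omega) (by omega)
              have : PySem.List.pyGet? cs k =
                  PySem.List.pyGet? cs (i + 1 + (j - 1) - k) := this
              simpa [show i + 1 + (j - 1) - k = i + j - k by ring] using this
        · intro h k hik hkj
          have := h k (by omega) (by omega)
          simpa [show i + 1 + (j - 1) - k = i + j - k by ring] using this
      · rw [if_neg heq]
        simp only [Bool.false_eq_true, false_iff]
        intro h
        exact heq (by simpa using h i le_rfl (by omega))
    · rw [pvTwoPtr, if_neg hij]
      simp only [true_iff]
      intro k hik hkj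
      have : k = i ∧ i = j := by omega
      rw [this.1, ← this.2]
      congr 1
      omega

-- list reversal = symmetric agreement of all indices
theorem reverse_eq_iff_sym (cs : List Char) :
    (cs.reverse = cs) ↔
      (∀ k : Int, 0 ≤ k → k ≤ (cs.length : Int) - 1 →
        PySem.List.pyGet? cs k = PySem.List.pyGet? cs (0 + ((cs.length : Int) - 1) - k)) := by
  constructor
  · intro h k hk hk'
    have hklt : k.toNat < cs.length := by omega
    have h2 : (0 + ((cs.length : Int) - 1) - k) = ((cs.length - 1 - k.toNat : Nat) : Int) := by
      omega
    rw [PySem.List.pyGet?_of_nonneg cs hk, h2, PySem.List.pyGet?_natCast]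
    rw [List.getElem?_eq_getElem hklt, List.getElem?_eq_getElem (by omega)]
    have := List.getElem_reverse (l := cs) (i := cs.length - 1 - k.toNat)
      (by simpa using (by omega : cs.length - 1 - k.toNat < cs.length))
    simp only [show cs.length - 1 - (cs.length - 1 - k.toNat) = k.toNat from by omega] at this
    have hg : cs.reverse[cs.length - 1 - k.toNat]'(by simp; omega)
        = cs[cs.length - 1 - k.toNat]'(by omega) := List.getElem_of_eq h _
    rw [← hg, this]
  · intro h
    apply List.ext_getElem (by simp)
    intro m hm _
    have hm' : m < cs.length := by simpa using hm
    have := h (m : Int) (by positivity) (by omega)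
    have h2 : (0 + ((cs.length : Int) - 1) - m) = ((cs.length - 1 - m : Nat) : Int) := by omega
    rw [PySem.List.pyGet?_natCast, h2, PySem.List.pyGet?_natCast] at this
    rw [List.getElem?_eq_getElem hm', List.getElem?_eq_getElem (by omega)] at this
    rw [List.getElem_reverse]
    simpa using this.symm

-- per-string: A's reversed-copy test agrees with B's two-pointer test
theorem check_agree (s : String) :
    (pvAWhile s.toList s.toList.length [] = s.toList)
      = (pvTwoPtr s.toList 0 ((s.toList.length : Int) - 1) = true) := by
  rw [pvAWhile_eq s.toList s.toList.length le_rfl []]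
  simp only [List.take_length, List.nil_append]
  rw [eq_iff_iff, reverse_eq_iff_sym]
  exact (pvTwoPtr_iff s.toList _ 0 ((s.toList.length : Int) - 1) rfl).symm

-- ===== VERDICT (by name: the statement is the Claim_ definition above) =====
theorem count_palindrome_spec : Claim_equal_count_palindrome := by
  intro sample_list _
  unfold Spec_count_palindrome count_palindrome count_palindrome_alt
  have hf : (fun (count : Int) (string : String) =>
        let new_string := pvAWhile string.toList string.toList.length []
        if new_string = string.toList then count + 1 else count)
      = (fun (count : Int) (string : String) =>
        if pvTwoPtr string.toList 0 ((string.toList.length : Int) - 1) then count + 1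
        else count) := by
    funext count string
    by_cases h : pvAWhile string.toList string.toList.length [] = string.toList
    · simp only [h, if_pos]
      rw [if_pos (by rw [← check_agree]; exact h)]
    · simp only []
      rw [if_neg h, if_neg (by rw [← check_agree]; exact h)]
  rw [hf]
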